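-- pv_equiv track=rewrite | github.com/DivyanshFalodiya/plagiarism-detector | package/irehelper/IREProcessor.py | createTermDocumentMatrix
-- ===== SOURCE A (Python) =====
-- def createTermDocumentMatrix(corpus):
--     # Create a set of terms
--     features = set()
--     tokenList = []
--     for doc in corpus:
--         tokens = doc.split()
--         tokenList.append(tokens)
--         features = features.union(set(tokens))
--
--     # Create a term frequency dictionary for each token list
--     freqList = []
--     for tokens in tokenList:
--         freq = dict.fromkeys(features, 0)
--         for token in tokens:
--             freq[token] += 1
--         freqList.append(freq)
--
--     return freqList
-- ===== SOURCE B (Python) =====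
-- def createTermDocumentMatrix(corpus):
--     # Inverted/transposed construction: build one term-major matrix mapping each
--     # term to its per-document count vector, then emit each document's column.
--     token_lists = [doc.split() for doc in corpus]
--     n = len(token_lists)
--     rows = {}
--     for i, tokens in enumerate(token_lists):
--         for tok in tokens:
--             if tok not in rows:
--                 rows[tok] = [0] * n
--             rows[tok][i] += 1
--     return [{term: counts[i] for term, counts in rows.items()} for i in range(n)]
-- ===== Notes on version B (the rewrite author's own statement) =====
-- stated objective: alternative
-- what changed: A is document-major: for each document it zero-initialises a dict over the whole vocabulary and increments counts in place; B is term-major (an inverted/transposed construction): one nested pass builds a term -> per-document count-vector matrix (rows[tok][i] += 1), and the result dicts are the columns of that matrix, one per document index.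
import Mathlib
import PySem

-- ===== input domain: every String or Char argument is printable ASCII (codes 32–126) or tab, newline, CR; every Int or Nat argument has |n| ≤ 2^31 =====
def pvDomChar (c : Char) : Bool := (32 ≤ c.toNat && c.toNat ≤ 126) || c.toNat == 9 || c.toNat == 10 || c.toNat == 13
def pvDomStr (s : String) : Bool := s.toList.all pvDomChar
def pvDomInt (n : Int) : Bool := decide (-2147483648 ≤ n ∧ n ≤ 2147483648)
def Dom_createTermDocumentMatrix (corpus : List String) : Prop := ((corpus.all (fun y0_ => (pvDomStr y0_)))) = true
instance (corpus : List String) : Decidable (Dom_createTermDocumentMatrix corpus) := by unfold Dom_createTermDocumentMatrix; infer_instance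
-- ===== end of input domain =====

-- B replaces A's document-major pass (zero-init a full-vocabulary dict per document, increment in
-- place) by a term-major inverted/transposed construction: one nested pass builds a term -> per-document
-- count-vector matrix, and the result dicts are that matrix's columns; objective: alternative.
-- Output dicts are association lists in vocabulary first-insertion order (Python dict == ignores key order).

-- ===== PORT A =====
def createTermDocumentMatrix (corpus : List String) : List (List (String × Int)) :=
  -- features = set(); tokenList = []; for doc in corpus: tokens = doc.split(); tokenList.append(tokens); features = features.union(set(tokens))
  let p := corpus.foldl
    (fun (st : PySem.Set String × List (List String)) doc =>
      let tokens := PySem.Str.split₀ doc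
      (PySem.Set.union st.1 (PySem.Set.ofList tokens), st.2 ++ [tokens]))
    (PySem.Set.empty, [])
  -- freqList = []; for tokens in tokenList: freq = dict.fromkeys(features, 0); for token in tokens: freq[token] += 1; freqList.append(freq)
  p.2.foldl
    (fun freqList tokens =>
      let freq : PySem.Dict String Int := PySem.Dict.ofList (p.1.map (fun t => (t, (0 : Int))))
      let freq := tokens.foldl (fun d tok => d.modify tok 0 (· + 1)) freq
      freqList ++ [freq.items])
    []

-- ===== PORT B =====
-- the inner loop body of B: 'if tok not in rows: rows[tok] = [0]*n' then 'rows[tok][i] += 1'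
-- (the list index i is always in range: every vector has length n and 0 ≤ i < n)
def pvRowStep (n : Nat) (i : Int) (rows : PySem.Dict String (List Int)) (tok : String) :
    PySem.Dict String (List Int) :=
  let rows := if rows.contains tok then rows else rows.insert tok (List.replicate n 0)
  rows.modify tok [] (fun l => l.set i.toNat (l.getD i.toNat 0 + 1))

def createTermDocumentMatrix_alt (corpus : List String) : List (List (String × Int)) :=
  -- token_lists = [doc.split() for doc in corpus]; n = len(token_lists)
  let tokenLists := corpus.map PySem.Str.split₀
  let n := tokenLists.length
  -- rows = {}; for i, tokens in enumerate(token_lists): for tok in tokens: <pvRowStep>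
  let rows : PySem.Dict String (List Int) :=
    (PySem.List.enumerate tokenLists).foldl
      (fun rows p => p.2.foldl (pvRowStep n p.1) rows)
      PySem.Dict.empty
  -- return [{term: counts[i] for term, counts in rows.items()} for i in range(n)]
  (PySem.List.pyRange 0 (n : Int) 1).map
    (fun i => rows.items.map (fun p => (p.1, p.2.getD i.toNat 0)))

-- ===== PRECONDITION & SPEC =====
def Spec_createTermDocumentMatrix (corpus : List String) (out : List (List (String × Int))) : Prop := out = createTermDocumentMatrix_alt corpus
instance (corpus : List String) (out : List (List (String × Int))) : Decidable (Spec_createTermDocumentMatrix corpus out) := by unfold Spec_createTermDocumentMatrix; infer_instance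

-- ===== CLAIM (what is proved, stated in full; the proofs are below) =====
def Claim_equal_createTermDocumentMatrix : Prop := ∀ (corpus : List String), Dom_createTermDocumentMatrix corpus → Spec_createTermDocumentMatrix corpus (createTermDocumentMatrix corpus)

-- ===== LEMMAS AND PROOFS =====

-- the vocabulary both programs accumulate: first-insertion-order union of per-document token sets
def pvFeats (corpus : List String) : PySem.Set String :=
  corpus.foldl (fun s doc => PySem.Set.update s (PySem.Set.ofList (PySem.Str.split₀ doc))) []

theorem pvSet_update_eq_self {s : PySem.Set String} {xs : List String}
    (h : ∀ x ∈ xs, x ∈ s) : PySem.Set.update s xs = s := by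
  induction xs generalizing s with
  | nil => rfl
  | cons x xs ih =>
    simp only [PySem.Set.update, List.foldl_cons]
    rw [PySem.Set.add_of_mem (h x (by simp))]
    exact ih (fun y hy => h y (by simp [hy]))

theorem pvFeats_mono (corpus : List String) (s : PySem.Set String) (y : String) (hy : y ∈ s) :
    y ∈ corpus.foldl (fun s doc => PySem.Set.update s (PySem.Set.ofList (PySem.Str.split₀ doc))) s := by
  induction corpus generalizing s with
  | nil => exact hy
  | cons d ds ih => exact ih _ ((PySem.Set.mem_update _ _ _).2 (Or.inl hy))

theorem pvMem_feats_aux : ∀ (ds : List String) (doc : String), doc ∈ ds → ∀ (x : String), x ∈ PySem.Str.split₀ doc →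
    ∀ (s : PySem.Set String),
    x ∈ ds.foldl (fun s doc => PySem.Set.update s (PySem.Set.ofList (PySem.Str.split₀ doc))) s := by
  intro ds
  induction ds with
  | nil => intro _ h; cases h
  | cons d ds ih =>
    intro doc hd x hx s
    simp only [List.foldl_cons]
    rcases List.mem_cons.1 hd with h | h
    · subst h
      exact pvFeats_mono ds _ x ((PySem.Set.mem_update _ _ _).2 (Or.inr ((PySem.Set.mem_ofList _ _).2 hx)))
    · exact ih doc h x hx _

theorem pvMem_feats (corpus : List String) (doc : String) (hd : doc ∈ corpus)
    (x : String) (hx : x ∈ PySem.Str.split₀ doc) : x ∈ pvFeats corpus :=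
  pvMem_feats_aux corpus doc hd x hx []

theorem pvFeats_nodup_aux (ds : List String) (s : PySem.Set String) (hs : s.Nodup) :
    (ds.foldl (fun s doc => PySem.Set.update s (PySem.Set.ofList (PySem.Str.split₀ doc))) s).Nodup := by
  induction ds generalizing s with
  | nil => exact hs
  | cons d ds ih => exact ih _ (PySem.Set.nodup_update _ _ hs)

theorem pvFeats_nodup (corpus : List String) : (pvFeats corpus).Nodup :=
  pvFeats_nodup_aux corpus [] List.nodup_nil

theorem pvGetD_zero_aux (l : List String) (d : PySem.Dict String Int)
    (h : ∀ k, d.getD k 0 = 0) (k : String) :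
    ((l.map (fun t => (t, (0 : Int)))).foldl (fun acc p => acc.insert p.1 p.2) d).getD k 0 = 0 := by
  induction l generalizing d with
  | nil => exact h k
  | cons x xs ih =>
    simp only [List.map_cons, List.foldl_cons]
    refine ih _ (fun k' => ?_)
    rw [PySem.Dict.getD_insert]
    split
    · rfl
    · exact h k'

theorem pvGetD_zero_dict (l : List String) (k : String) :
    (PySem.Dict.ofList (l.map (fun t => (t, (0 : Int))))).getD k 0 = 0 := by
  simp only [PySem.Dict.ofList, PySem.Dict.update]
  exact pvGetD_zero_aux l _ (fun k' => PySem.Dict.getD_empty k' 0) k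

theorem pvA_eq (corpus : List String) :
    createTermDocumentMatrix corpus =
      (corpus.map PySem.Str.split₀).map
        (fun tokens => (pvFeats corpus).map (fun t => (t, (tokens.count t : Int)))) := by
  unfold createTermDocumentMatrix pvFeats
  simp only [PySem.Set.union, PySem.Set.empty]
  rw [PySem.List.foldl_prod_mk
        (f := fun s doc => PySem.Set.update s (PySem.Set.ofList (PySem.Str.split₀ doc)))
        (g := fun acc doc => acc ++ [PySem.Str.split₀ doc])]
  simp only [PySem.List.foldl_append_singleton_eq_map, List.nil_append]
  apply List.map_congr_left
  intro tokens htok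
  obtain ⟨doc, hdoc, rfl⟩ := List.mem_map.1 htok
  set F := corpus.foldl (fun s doc => PySem.Set.update s (PySem.Set.ofList (PySem.Str.split₀ doc))) [] with hF
  have hd0 : (PySem.Dict.ofList (F.map (fun t => (t, (0 : Int))))).keys = F := by
    simp only [PySem.Dict.ofList, PySem.Dict.update]
    rw [PySem.Dict.keys_foldl_insert_key (key := Prod.fst) (f := fun d (p : String × Int) => p.2)]
    have : List.map Prod.fst (F.map (fun t => (t, (0 : Int)))) = F := by
      simp [List.map_map, Function.comp_def]
    rw [this, PySem.Dict.keys_empty,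
        show PySem.Set.update ([] : PySem.Set String) F = PySem.Set.ofList F from
          (PySem.Set.ofList_eq_foldl F).symm]
    exact PySem.Set.ofList_eq_self_of_nodup F (pvFeats_nodup corpus)
  have hkeys : ((PySem.Str.split₀ doc).foldl (fun d tok => d.modify tok 0 (· + 1))
      (PySem.Dict.ofList (F.map (fun t => (t, (0 : Int)))))).keys = F := by
    rw [PySem.Dict.keys_foldl_modify (f := fun _ _ => (· + 1)), hd0]
    exact pvSet_update_eq_self (fun x hx => pvMem_feats corpus doc hdoc x hx)
  rw [PySem.Dict.items_eq_map_keys _ (by rw [hkeys]; exact pvFeats_nodup corpus) 0, hkeys]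
  simp only [PySem.Dict.getD_foldl_modify_add_one, pvGetD_zero_dict, zero_add]

-- ————— B side —————

-- entry i of the count vector stored for term t (0 when t is absent)
def pvG (d : PySem.Dict String (List Int)) (t : String) (i : Nat) : Int :=
  (d.getD t []).getD i 0

theorem pvSet_add_of_not_mem (s : PySem.Set String) (x : String) (h : x ∉ s) :
    PySem.Set.add s x = s ++ [x] := by
  simp [PySem.Set.add, PySem.Set.contains, h]

theorem pvKeys_pvRowStep (n : Nat) (i : Int) (rows : PySem.Dict String (List Int)) (tok : String) :
    (pvRowStep n i rows tok).keys = PySem.Set.add rows.keys tok := by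
  unfold pvRowStep
  by_cases h : rows.contains tok = true
  · rw [if_pos h, PySem.Dict.keys_modify, PySem.Dict.keys_insert_of_contains _ _ h,
        PySem.Set.add_of_mem ((PySem.Dict.contains_iff_mem_keys rows tok).1 h)]
  · have h' : rows.contains tok = false := by simpa using h
    rw [if_neg h, PySem.Dict.keys_modify,
        PySem.Dict.keys_insert_of_contains _ _ (PySem.Dict.contains_insert_self rows tok _),
        PySem.Dict.keys_insert_of_not_contains _ _ h',
        pvSet_add_of_not_mem _ _ (fun hm => by
          simp [(PySem.Dict.contains_iff_mem_keys rows tok).2 hm] at h')]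

theorem pvLen_pvRowStep (n : Nat) (i : Int) (rows : PySem.Dict String (List Int)) (tok : String)
    (hlen : ∀ u ∈ rows.keys, (rows.getD u []).length = n) :
    ∀ u ∈ (pvRowStep n i rows tok).keys, ((pvRowStep n i rows tok).getD u []).length = n := by
  intro u hu
  unfold pvRowStep
  by_cases hut : u = tok
  · subst hut
    by_cases h : rows.contains u = true
    · rw [if_pos h, PySem.Dict.getD_modify_self, List.length_set]
      exact hlen _ ((PySem.Dict.contains_iff_mem_keys rows u).1 h)
    · rw [if_neg h, PySem.Dict.getD_modify_self, List.length_set,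
          PySem.Dict.getD_insert_self, List.length_replicate]
  · have hu' : u ∈ rows.keys := by
      rw [pvKeys_pvRowStep] at hu
      rcases (PySem.Set.mem_add _ _ _).1 hu with h | h
      · exact h
      · exact absurd h hut
    by_cases h : rows.contains tok = true
    · rw [if_pos h, PySem.Dict.getD_modify_of_ne _ _ _ hut]
      exact hlen _ hu'
    · rw [if_neg h, PySem.Dict.getD_modify_of_ne _ _ _ hut,
          PySem.Dict.getD_insert_of_ne _ _ _ hut]
      exact hlen _ hu'

theorem pvG_pvRowStep (n : Nat) (i : Int) (rows : PySem.Dict String (List Int)) (tok t : String)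
    (i' : Nat) (hlen : ∀ u ∈ rows.keys, (rows.getD u []).length = n) (hi : i.toNat < n) :
    pvG (pvRowStep n i rows tok) t i' =
      pvG rows t i' + if t = tok ∧ i' = i.toNat then 1 else 0 := by
  unfold pvRowStep pvG
  by_cases ht : t = tok
  · subst ht
    by_cases h : rows.contains t = true
    · rw [if_pos h, PySem.Dict.getD_modify_self]
      have hv : (rows.getD t []).length = n :=
        hlen _ ((PySem.Dict.contains_iff_mem_keys rows t).1 h)
      by_cases hii : i' = i.toNat
      · subst hii
        rw [List.getD_eq_getElem?_getD,
            List.getElem?_set_self (l := rows.getD t []) (by omega)]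
        simp [List.getD_eq_getElem?_getD]
      · rw [List.getD_eq_getElem?_getD, List.getElem?_set_ne (fun e => hii e.symm),
            ← List.getD_eq_getElem?_getD]
        simp [hii]
    · have h' : rows.contains t = false := by simpa using h
      rw [if_neg h, PySem.Dict.getD_modify_self, PySem.Dict.getD_insert_self,
          PySem.Dict.getD_of_not_contains _ _ h']
      by_cases hii : i' = i.toNat
      · subst hii
        rw [List.getD_eq_getElem?_getD,
            List.getElem?_set_self (l := List.replicate n (0 : Int))
              (by simp [List.length_replicate]; omega)]
        simp
      · rw [List.getD_eq_getElem?_getD, List.getElem?_set_ne (fun e => hii e.symm),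
            ← List.getD_eq_getElem?_getD]
        by_cases hlt : i' < n <;>
          simp [List.getD_eq_getElem?_getD, hlt, hii]
  · rw [PySem.Dict.getD_modify_of_ne _ _ _ ht]
    by_cases h : rows.contains tok = true
    · simp [h, ht]
    · simp only [if_neg h]
      rw [PySem.Dict.getD_insert_of_ne _ _ _ ht]
      simp [ht]

theorem pvInner (n : Nat) (i : Int) (hi : i.toNat < n) :
    ∀ (tokens : List String) (rows : PySem.Dict String (List Int)),
      (∀ u ∈ rows.keys, (rows.getD u []).length = n) → rows.keys.Nodup →
      ((tokens.foldl (pvRowStep n i) rows).keys = PySem.Set.update rows.keys tokens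
       ∧ (tokens.foldl (pvRowStep n i) rows).keys.Nodup
       ∧ (∀ u ∈ (tokens.foldl (pvRowStep n i) rows).keys,
            ((tokens.foldl (pvRowStep n i) rows).getD u []).length = n)
       ∧ ∀ t i', pvG (tokens.foldl (pvRowStep n i) rows) t i' =
            pvG rows t i' + if i' = i.toNat then (tokens.count t : Int) else 0) := by
  intro tokens
  induction tokens with
  | nil =>
    intro rows hlen hnod
    refine ⟨rfl, hnod, hlen, fun t i' => by simp⟩
  | cons tok rest ih =>
    intro rows hlen hnod
    have hkeys1 := pvKeys_pvRowStep n i rows tok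
    have hlen1 := pvLen_pvRowStep n i rows tok hlen
    have hnod1 : (pvRowStep n i rows tok).keys.Nodup := by
      rw [hkeys1]; exact PySem.Set.nodup_add _ _ hnod
    obtain ⟨K, N, L, G⟩ := ih (pvRowStep n i rows tok) hlen1 hnod1
    refine ⟨?_, N, L, ?_⟩
    · rw [List.foldl_cons, K, hkeys1]; rfl
    · intro t i'
      rw [List.foldl_cons, G t i', pvG_pvRowStep n i rows tok t i' hlen hi]
      by_cases ht : t = tok <;> by_cases hii : i' = i.toNat <;>
        simp [ht, hii, List.count_cons] <;>
          first
            | ring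
            | exact Ne.symm ht

theorem pvOuter (n : Nat) :
    ∀ (ts : List (List String)) (j : Nat) (rows : PySem.Dict String (List Int)),
      j + ts.length ≤ n →
      (∀ u ∈ rows.keys, (rows.getD u []).length = n) → rows.keys.Nodup →
      (((PySem.List.enumerate ts (j : Int)).foldl
          (fun rows p => p.2.foldl (pvRowStep n p.1) rows) rows).keys
          = ts.foldl (fun s tk => PySem.Set.update s tk) rows.keys
       ∧ ((PySem.List.enumerate ts (j : Int)).foldl
          (fun rows p => p.2.foldl (pvRowStep n p.1) rows) rows).keys.Nodup
       ∧ (∀ u ∈ ((PySem.List.enumerate ts (j : Int)).foldl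
          (fun rows p => p.2.foldl (pvRowStep n p.1) rows) rows).keys,
            (((PySem.List.enumerate ts (j : Int)).foldl
          (fun rows p => p.2.foldl (pvRowStep n p.1) rows) rows).getD u []).length = n)
       ∧ ∀ t i', i' < n →
          pvG ((PySem.List.enumerate ts (j : Int)).foldl
              (fun rows p => p.2.foldl (pvRowStep n p.1) rows) rows) t i' =
            pvG rows t i' +
              (if h2 : j ≤ i' ∧ i' - j < ts.length then ((ts[i' - j]'h2.2).count t : Int) else 0)) := by
  intro ts
  induction ts with
  | nil =>
    intro j rows hj hlen hnod
    refine ⟨by simp [PySem.List.enumerate_nil], by simp [PySem.List.enumerate_nil]; exact hnod,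
      by simpa [PySem.List.enumerate_nil] using hlen, fun t i' hi' => by
        simp [PySem.List.enumerate_nil]⟩
  | cons tk ts ih =>
    intro j rows hj hlen hnod
    have hjn : ((j : Int)).toNat < n := by
      simp only [Int.toNat_natCast]
      simp only [List.length_cons] at hj
      omega
    obtain ⟨K1, N1, L1, G1⟩ := pvInner n (j : Int) hjn tk rows hlen hnod
    have hcast : ((j : Int) + 1) = (((j + 1 : Nat)) : Int) := by push_cast; ring
    rw [PySem.List.enumerate_cons, List.foldl_cons]
    simp only [hcast]
    obtain ⟨K, N, L, G⟩ := ih (j + 1) (tk.foldl (pvRowStep n (j : Int)) rows)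
      (by simp at hj ⊢; omega) L1 N1
    refine ⟨by rw [K, K1, List.foldl_cons], N, L, ?_⟩
    intro t i' hi'
    rw [G t i' hi', G1 t i']
    simp only [Int.toNat_natCast]
    by_cases h1 : i' = j
    · subst h1
      have hc1 : ¬ (i' + 1 ≤ i' ∧ i' - (i' + 1) < ts.length) := by omega
      have hc2 : i' ≤ i' ∧ i' - i' < ts.length + 1 := by omega
      rw [dif_neg hc1, dif_pos (by simp)]
      simp
    · by_cases h2 : j + 1 ≤ i' ∧ i' - (j + 1) < ts.length
      · have hc2 : j ≤ i' ∧ i' - j < (tk :: ts).length := by simp; omega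
        rw [dif_pos h2, dif_pos hc2]
        have hidx : i' - j = (i' - (j + 1)) + 1 := by omega
        simp only [if_neg h1]
        rw [show ((tk :: ts)[i' - j]'hc2.2 : List String)
              = ts[i' - (j + 1)]'h2.2 from by
            simp only [hidx, List.getElem_cons_succ]]
        ring
      · have hc2 : ¬ (j ≤ i' ∧ i' - j < (tk :: ts).length) := by simp; omega
        rw [dif_neg h2, dif_neg hc2]
        simp [h1]

theorem pvSet_update_add (s r : PySem.Set String) (x : String) :
    PySem.Set.update s (PySem.Set.add r x) = PySem.Set.add (PySem.Set.update s r) x := by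
  by_cases h : x ∈ r
  · rw [PySem.Set.add_of_mem h,
        PySem.Set.add_of_mem ((PySem.Set.mem_update s r x).2 (Or.inr h))]
  · rw [pvSet_add_of_not_mem _ _ h]
    simp only [PySem.Set.update, List.foldl_append, List.foldl_cons, List.foldl_nil]

theorem pvSet_update_update (l : List String) (s r : PySem.Set String) :
    PySem.Set.update s (PySem.Set.update r l) = PySem.Set.update (PySem.Set.update s r) l := by
  induction l generalizing r with
  | nil => rfl
  | cons x l ih =>
    show PySem.Set.update s (PySem.Set.update (PySem.Set.add r x) l)
        = PySem.Set.update (PySem.Set.update s r) (x :: l)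
    rw [ih (PySem.Set.add r x)]
    show PySem.Set.update (PySem.Set.update s (PySem.Set.add r x)) l
        = PySem.Set.update (PySem.Set.add (PySem.Set.update s r) x) l
    rw [pvSet_update_add]

theorem pvSet_update_ofList (s : PySem.Set String) (l : List String) :
    PySem.Set.update s (PySem.Set.ofList l) = PySem.Set.update s l := by
  rw [PySem.Set.ofList_eq_foldl,
      show List.foldl PySem.Set.add [] l = PySem.Set.update [] l from rfl,
      pvSet_update_update]
  rfl

theorem pvB_eq (corpus : List String) :
    createTermDocumentMatrix_alt corpus =
      (corpus.map PySem.Str.split₀).map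
        (fun tokens => (pvFeats corpus).map (fun t => (t, (tokens.count t : Int)))) := by
  unfold createTermDocumentMatrix_alt
  dsimp only
  obtain ⟨K, N, L, G⟩ := pvOuter (corpus.map PySem.Str.split₀).length
      (corpus.map PySem.Str.split₀) 0 PySem.Dict.empty (by omega)
      (by simp [PySem.Dict.keys_empty]) (by simp [PySem.Dict.keys_empty])
  simp only [Nat.cast_zero] at K N L G
  have hfeats : (corpus.map PySem.Str.split₀).foldl (fun s tk => PySem.Set.update s tk)
      (PySem.Dict.empty : PySem.Dict String (List Int)).keys = pvFeats corpus := by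
    rw [PySem.Dict.keys_empty, List.foldl_map]
    unfold pvFeats
    exact PySem.List.foldl_congr_mem corpus _ _ []
      (fun acc x _ => (pvSet_update_ofList acc (PySem.Str.split₀ x)).symm)
  rw [PySem.List.pyRange_zero_natCast, List.map_map,
      PySem.Dict.items_eq_map_keys _ N ([] : List Int), K, hfeats]
  apply List.ext_getElem (by simp)
  intro k hk hk'
  have hkn : k < (corpus.map PySem.Str.split₀).length := by simpa using hk'
  simp only [List.getElem_map, List.getElem_range, Function.comp_apply, Int.toNat_natCast,
    List.map_map]
  apply List.map_congr_left
  intro t ht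
  have hG := G t k hkn
  rw [dif_pos ⟨Nat.zero_le k, by simpa using hkn⟩] at hG
  simp only [pvG, PySem.Dict.getD_empty, List.getD_nil, Nat.sub_zero, zero_add] at hG
  simp only [Function.comp_apply]
  rw [hG, List.getElem_map]

-- ===== VERDICT (by name: the statement is the Claim_ definition above) =====
theorem createTermDocumentMatrix_spec : Claim_equal_createTermDocumentMatrix := by
  intro corpus _
  unfold Spec_createTermDocumentMatrix
  rw [pvA_eq, pvB_eq]
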